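-- pv_equiv track=rewrite | github.com/teddyjfpender/skill-issues | eval/ralph/extract-feedback.py | extract_errors_from_output
-- ===== SOURCE A (Python) =====
-- def extract_errors_from_output(output: str, step: str) -> list[str]:
--     """Extract error messages from step output."""
--     errors = []
--     lines = output.split("\n")
--
--     # Find error blocks (error: ... followed by location and code)
--     current_error = []
--     in_error = False
--
--     for line in lines:
--         if line.startswith("error:") or line.startswith("Error:"):
--             if current_error:
--                 errors.append("\n".join(current_error))
--             current_error = [line]
--             in_error = True
--         elif in_error:
--             if line.strip() and not line.startswith("warning:"):
--                 current_error.append(line)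
--             else:
--                 if current_error:
--                     errors.append("\n".join(current_error))
--                 current_error = []
--                 in_error = False
--
--     if current_error:
--         errors.append("\n".join(current_error))
--
--     return errors
-- ===== SOURCE B (Python) =====
-- def extract_errors_from_output(output: str, step: str) -> list[str]:
--     """Extract error messages from step output."""
--     lines = output.split("\n")
--     errors = []
--     i, n = 0, len(lines)
--     while i < n:
--         line = lines[i]
--         if line.startswith("error:") or line.startswith("Error:"):
--             block = [line]
--             i += 1
--             while i < n:
--                 line = lines[i]
--                 if line.startswith("error:") or line.startswith("Error:"):
--                     break
--                 if line.strip() and not line.startswith("warning:"):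
--                     block.append(line)
--                     i += 1
--                 else:
--                     i += 1
--                     break
--             errors.append("\n".join(block))
--         else:
--             i += 1
--     return errors
-- ===== Notes on version B (the rewrite author's own statement) =====
-- stated objective: alternative
-- what changed: Replaced A's flag-based single pass carrying current_error/in_error state with a nested scan: an outer loop that skips to each 'error:'/'Error:' header and an inner loop that collects that block's continuation lines (leaving a new header unconsumed, consuming a blank/warning terminator).
import Mathlib
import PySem

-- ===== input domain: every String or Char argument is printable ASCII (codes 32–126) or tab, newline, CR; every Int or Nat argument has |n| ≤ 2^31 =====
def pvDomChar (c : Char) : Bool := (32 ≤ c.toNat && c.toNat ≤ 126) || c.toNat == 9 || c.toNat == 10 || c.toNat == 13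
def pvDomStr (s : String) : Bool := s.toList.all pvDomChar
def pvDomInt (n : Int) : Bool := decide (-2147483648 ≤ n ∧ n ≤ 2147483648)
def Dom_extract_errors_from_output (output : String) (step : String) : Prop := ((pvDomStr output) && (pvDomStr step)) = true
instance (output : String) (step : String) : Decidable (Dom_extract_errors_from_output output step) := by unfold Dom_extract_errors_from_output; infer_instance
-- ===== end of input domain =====

-- B replaces A's flag/carryover single pass with an index-free nested scan (outer scan finds
-- an error header, inner scan collects its block); same return value, objective: alternative.

-- ===== PORT A =====
-- line.startswith("error:") or line.startswith("Error:")
def pvIsErrStart (line : String) : Bool :=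
  PySem.Str.startswith line "error:" || PySem.Str.startswith line "Error:"

-- line.strip() truthy and not line.startswith("warning:")
def pvIsContent (line : String) : Bool :=
  PySem.Str.strip line ≠ "" && !PySem.Str.startswith line "warning:"

-- one iteration of A's for-loop over (errors, current_error, in_error)
def pvAStep (st : List String × List String × Bool) (line : String) :
    List String × List String × Bool :=
  let (errors, cur, inerr) := st
  if pvIsErrStart line then
    ((if cur ≠ [] then errors ++ [PySem.Str.join "\n" cur] else errors), [line], true)
  else if inerr then
    if pvIsContent line then (errors, cur ++ [line], true)
    else ((if cur ≠ [] then errors ++ [PySem.Str.join "\n" cur] else errors), [], false)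
  else st

def extract_errors_from_output (output : String) (step : String) : List String :=
  let lines := (PySem.Str.split? output "\n").getD []
  let (errors, cur, _) := lines.foldl pvAStep ([], [], false)
  if cur ≠ [] then errors ++ [PySem.Str.join "\n" cur] else errors

-- ===== PORT B =====
-- inner scan: collect the continuation lines of a block; returns (collected, remaining lines).
-- A new error header is left unconsumed; a blank/warning terminator is consumed.
def pvBInner : List String → List String × List String
  | [] => ([], [])
  | line :: rest =>
    if pvIsErrStart line then ([], line :: rest)
    else if pvIsContent line then
      let (b, r) := pvBInner rest
      (line :: b, r)
    else ([], rest)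

theorem pvBInner_len_le : ∀ l : List String, (pvBInner l).2.length ≤ l.length
  | [] => Nat.le_refl _
  | line :: rest => by
    simp only [pvBInner]
    split
    · simp
    · split
      · have := pvBInner_len_le rest
        cases h : pvBInner rest with
        | mk b r => simp_all; omega
      · simp

-- outer scan: skip to the next error header, collect its block, continue after it
def pvBOuter : List String → List String
  | [] => []
  | line :: rest =>
    if pvIsErrStart line then
      PySem.Str.join "\n" (line :: (pvBInner rest).1) :: pvBOuter (pvBInner rest).2
    else pvBOuter rest
  termination_by l => l.length
  decreasing_by
  · have := pvBInner_len_le rest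
    simp only [List.length_cons]
    omega
  · simp

def extract_errors_from_output_alt (output : String) (step : String) : List String :=
  pvBOuter ((PySem.Str.split? output "\n").getD [])

-- ===== PRECONDITION & SPEC =====
def Spec_extract_errors_from_output (output : String) (step : String) (out : List String) : Prop := out = extract_errors_from_output_alt output step
instance (output : String) (step : String) (out : List String) : Decidable (Spec_extract_errors_from_output output step out) := by unfold Spec_extract_errors_from_output; infer_instance

-- ===== CLAIM (what is proved, stated in full; the proofs are below) =====
def Claim_equal_extract_errors_from_output : Prop := ∀ (output : String) (step : String), Dom_extract_errors_from_output output step → Spec_extract_errors_from_output output step (extract_errors_from_output output step)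

-- ===== LEMMAS AND PROOFS =====
-- finish A's fold: flush the pending block
def pvAFin (st : List String × List String × Bool) : List String :=
  if st.2.1 ≠ [] then st.1 ++ [PySem.Str.join "\n" st.2.1] else st.1

-- the two simultaneous invariants: idle state vs in-error state
theorem pvA_run :
    ∀ lines : List String,
      (∀ errs : List String,
        pvAFin (lines.foldl pvAStep (errs, [], false)) = errs ++ pvBOuter lines) ∧
      (∀ (errs cur : List String), cur ≠ [] →
        pvAFin (lines.foldl pvAStep (errs, cur, true)) =
          errs ++ PySem.Str.join "\n" (cur ++ (pvBInner lines).1) :: pvBOuter (pvBInner lines).2)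
  | [] => by
    constructor
    · intro errs; simp [pvAFin, pvBOuter]
    · intro errs cur h; simp [pvAFin, pvBInner, pvBOuter, h]
  | line :: rest => by
    obtain ⟨ihP, ihQ⟩ := pvA_run rest
    constructor
    · intro errs
      by_cases he : pvIsErrStart line
      · rw [List.foldl_cons]
        simp only [pvAStep, he, if_pos, ne_eq, not_true_eq_false, reduceIte]
        rw [ihQ errs [line] (by simp)]
        simp [pvBOuter, he]
      · rw [List.foldl_cons]
        simp only [pvAStep, he]
        simp only [Bool.false_eq_true, if_false]
        rw [ihP errs]
        simp [pvBOuter, he]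
    · intro errs cur hcur
      by_cases he : pvIsErrStart line
      · rw [List.foldl_cons]
        simp only [pvAStep, he, ne_eq, hcur, not_false_eq_true, if_pos]
        rw [ihQ (errs ++ [PySem.Str.join "\n" cur]) [line] (by simp)]
        simp only [pvBInner, he, reduceIte]
        simp only [pvBOuter, he, reduceIte]
        simp
      · by_cases hc : pvIsContent line
        · rw [List.foldl_cons]
          simp only [pvAStep, he, Bool.false_eq_true, if_false, hc, if_pos]
          rw [ihQ errs (cur ++ [line]) (by simp)]
          simp only [pvBInner, he, Bool.false_eq_true, if_false, hc, reduceIte]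
          cases h : pvBInner rest with
          | mk b r => simp [List.append_assoc]
        · rw [List.foldl_cons]
          simp only [pvAStep, he, Bool.false_eq_true, if_false, hc, ne_eq, hcur,
            not_false_eq_true, if_pos]
          rw [ihP (errs ++ [PySem.Str.join "\n" cur])]
          simp [pvBInner, he, hc]

-- ===== VERDICT (by name: the statement is the Claim_ definition above) =====
theorem extract_errors_from_output_spec : Claim_equal_extract_errors_from_output := by
  intro output step _
  unfold Spec_extract_errors_from_output extract_errors_from_output extract_errors_from_output_alt
  have h := (pvA_run ((PySem.Str.split? output "\n").getD [])).1 []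
  simpa [pvAFin] using h
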